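-- pv_equiv track=rewrite | github.com/Abhigyn/Project-code-for-python | webfiles/X+Y Solver.py | transformed
-- ===== SOURCE A (Python) =====
-- def transformed(b):
--     for i in range(len(b)-1):
--         if b[i] == "1":
--             b[i] = "0"
--             if b[i + 1] == '0':
--                 b[i + 1] = "1"
--             else:
--                 b[i + 1] = "1"
--     return b
-- ===== SOURCE B (Python) =====
-- def transformed(b):
--     n = len(b)
--     j = next((i for i in range(n - 1) if b[i] == "1"), None)
--     if j is not None:
--         b[j:n - 1] = ["0"] * (n - 1 - j)
--         b[n - 1] = "1"
--     return b
-- ===== Notes on version B (the rewrite author's own statement) =====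
-- stated objective: simpler
-- what changed: Replaces A's state-propagating forward pass (which repeatedly sets b[i]='0', b[i+1]='1') with locating the first '1' in b[:-1] and then filling the suffix from there with '0's and a final '1' in one slice assignment.
import Mathlib
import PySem

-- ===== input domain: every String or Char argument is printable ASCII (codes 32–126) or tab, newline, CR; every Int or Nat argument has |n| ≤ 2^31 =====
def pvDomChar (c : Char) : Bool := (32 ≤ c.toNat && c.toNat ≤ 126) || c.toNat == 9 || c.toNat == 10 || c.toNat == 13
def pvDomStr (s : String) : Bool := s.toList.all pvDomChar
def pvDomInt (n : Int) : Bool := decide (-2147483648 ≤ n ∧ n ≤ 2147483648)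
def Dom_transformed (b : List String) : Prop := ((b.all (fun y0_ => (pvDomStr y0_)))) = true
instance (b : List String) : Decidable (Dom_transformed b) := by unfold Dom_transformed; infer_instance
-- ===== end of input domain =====

-- B replaces A's forward state-propagating pass by finding the first "1" in b[:-1]
-- and filling the suffix with "0"s plus a final "1" (objective: simpler).
-- Both Pythons mutate the list in place; the equivalence proved here is about the return value.

-- ===== PORT A =====
-- the for-loop over range(len(b)-1), carrying the mutated list; structural recursion on stop - i
def transAuxA (stop : Nat) (i : Nat) (b : List String) : List String :=
  if _h : i < stop then
    let b' :=
      if b.getD i "" = "1" then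
        let b1 := (b.set i "0")
        if b1.getD (i+1) "" = "0" then b1.set (i+1) "1" else b1.set (i+1) "1"
      else b
    transAuxA stop (i+1) b'
  else b
termination_by stop - i

def transformed (b : List String) : List String :=
  transAuxA (b.length - 1) 0 b

-- ===== PORT B =====
def transformed_alt (b : List String) : List String :=
  match (b.take (b.length - 1)).findIdx? (fun s => s = "1") with
  | none => b
  | some j => b.take j ++ List.replicate (b.length - 1 - j) "0" ++ ["1"]

-- ===== PRECONDITION & SPEC =====
def Spec_transformed (b : List String) (out : List String) : Prop := out = transformed_alt b
instance (b : List String) (out : List String) : Decidable (Spec_transformed b out) := by unfold Spec_transformed; infer_instance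

-- ===== CLAIM (what is proved, stated in full; the proofs are below) =====
def Claim_equal_transformed : Prop := ∀ (b : List String), Dom_transformed b → Spec_transformed b (transformed b)

-- ===== LEMMAS AND PROOFS =====

-- while no "1" is seen, the loop leaves the list untouched
theorem transAuxA_skip (stop m : Nat) : ∀ (i : Nat) (b : List String),
    i ≤ m → m ≤ stop → (∀ k, i ≤ k → k < m → b.getD k "" ≠ "1") →
    transAuxA stop i b = transAuxA stop m b := by
  intro i
  induction' hw : m - i with d ih generalizing i
  · intro b him _ _
    have : i = m := by omega
    subst this; rfl
  · intro b him hms hno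
    have hi : i < m := by omega
    rw [transAuxA]
    have hlt : i < stop := by omega
    rw [dif_pos hlt]
    rw [if_neg (hno i le_rfl hi)]
    exact ih (i+1) (by omega) b (by omega) hms (fun k hk1 hk2 => hno k (by omega) hk2)

-- taking one more element past a set cell
theorem take_succ_set (b : List String) (i : Nat) (hi : i < b.length) :
    ((b.set i "0").take (i+1)) = b.take i ++ ["0"] := by
  rw [List.set_eq_take_append_cons_drop, if_pos hi, List.take_append]
  simp [List.take_take, List.length_take, Nat.min_eq_left (Nat.le_of_lt hi)]

-- once b[i] = "1" (with i < stop < |b|), the loop zeroes out [i, stop) and puts "1" at stop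
theorem transAuxA_fill (stop : Nat) : ∀ (i : Nat) (b : List String),
    i < stop → stop < b.length → b.getD i "" = "1" →
    transAuxA stop i b = b.take i ++ List.replicate (stop - i) "0" ++ ["1"] ++ b.drop (stop + 1) := by
  intro i
  induction' hw : stop - i with d ih generalizing i
  · omega
  · intro b hi hs h1
    rw [transAuxA, dif_pos hi, if_pos h1]
    have hib : i < b.length := by omega
    have hi1b : i + 1 < b.length := by omega
    set b1 := b.set i "0" with hb1
    have hb1len : b1.length = b.length := by simp [hb1]
    by_cases hz : b1.getD (i+1) "" = "0"
    all_goals simp only [hz, if_pos, ite_self]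
    all_goals {
      set b2 := b1.set (i+1) "1" with hb2
      have hb2len : b2.length = b.length := by simp [hb2, hb1]
      have htake : b2.take (i+1) = b.take i ++ ["0"] := by
        rw [hb2, List.take_set_of_le (Nat.le_refl (i+1)), hb1, take_succ_set b i hib]
      have hdrop : b2.drop (stop + 1) = b.drop (stop + 1) := by
        rw [hb2, List.drop_set_of_lt (by omega), hb1, List.drop_set_of_lt (by omega)]
      by_cases hend : i + 1 < stop
      · have hget : b2.getD (i+1) "" = "1" := by
          simp [hb2, List.getD, hb1len, hi1b]
        have hrec := ih (i+1) (by omega) b2 hend (by omega) hget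
        rw [hrec, htake, hdrop]
        simp [List.replicate_succ]
      · -- i + 1 = stop : one step left, loop terminates
        have hstop : stop = i + 1 := by omega
        rw [transAuxA, dif_neg (by omega)]
        have hb2eq : b2 = b1.take (i+1) ++ "1" :: b1.drop (i+1+1) := by
          rw [hb2, List.set_eq_take_append_cons_drop, if_pos (by omega : i + 1 < b1.length)]
        have h2 : b1.take (i+1) = b.take i ++ ["0"] := by
          rw [hb1, take_succ_set b i hib]
        have h3 : b1.drop (i+1+1) = b.drop (i+1+1) := by
          rw [hb1, List.drop_set_of_lt (by omega)]
        have hd : d = 0 := by omega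
        subst hd
        rw [hb2eq, h2, h3, hstop]
        simp
    }

theorem findIdx?_take_none {b : List String} {m : Nat}
    (h : (b.take m).findIdx? (fun s => s = "1") = none) :
    ∀ k, k < m → k < b.length → b.getD k "" ≠ "1" := by
  intro k hk hkb
  have := List.findIdx?_eq_none_iff.mp h
  have hmem : b[k] ∈ b.take m := by
    rw [List.mem_take_iff_getElem]
    exact ⟨k, by omega, rfl⟩
  have := this _ hmem
  simp [List.getD, List.getElem?_eq_getElem hkb]
  intro hcontra
  rw [hcontra] at this
  simp at this

theorem transformed_eq_alt (b : List String) : transformed b = transformed_alt b := by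
  unfold transformed transformed_alt
  cases hf : (b.take (b.length - 1)).findIdx? (fun s => s = "1") with
  | none =>
      exact transAuxA_skip (b.length - 1) (b.length - 1) 0 b (by omega) le_rfl
        (fun k hk1 hk2 => findIdx?_take_none hf k hk2 (by omega)) ▸
        (by rw [transAuxA]; simp)
  | some j =>
      have hlen : (b.take (b.length - 1)).length = b.length - 1 := by
        simp
      have hj : j < b.length - 1 := by
        have := List.findIdx?_eq_some_iff_findIdx_eq.mp hf
        omega
      have hjb : j < b.length := by omega
      have h1 : b.getD j "" = "1" := by
        have hmem := List.findIdx?_eq_some_iff_getElem.mp hf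
        obtain ⟨hlt, hp, -⟩ := hmem
        have : (b.take (b.length - 1))[j] = b[j] := List.getElem_take
        rw [this] at hp
        simp at hp
        simp [List.getD, List.getElem?_eq_getElem hjb, hp]
      have hno : ∀ k, k < j → b.getD k "" ≠ "1" := by
        intro k hk
        have hmem := List.findIdx?_eq_some_iff_getElem.mp hf
        obtain ⟨hlt, -, hbefore⟩ := hmem
        have hkb : k < b.length := by omega
        have h2 := hbefore k (by omega)
        rw [(List.getElem_take : (b.take (b.length - 1))[k]'(by omega) = b[k])] at h2
        simp at h2
        simp [List.getD, List.getElem?_eq_getElem hkb]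
        exact h2
      rw [transAuxA_skip (b.length - 1) j 0 b (by omega) (by omega)
            (fun k hk1 hk2 => hno k hk2),
          transAuxA_fill (b.length - 1) j b hj (by omega) h1]
      have : b.drop (b.length - 1 + 1) = [] := by
        apply List.drop_eq_nil_of_le; omega
      rw [this]
      simp

-- ===== VERDICT (by name: the statement is the Claim_ definition above) =====
theorem transformed_spec : Claim_equal_transformed := by
  intro b _
  unfold Spec_transformed
  exact transformed_eq_alt b
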